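-- pv_equiv track=rewrite | github.com/jancaaa/advent-of-code2020 | day20/day20.py | get_all_neighbours
-- ===== SOURCE A (Python) =====
-- def get_possible_neighbours(tile: int, edge: str, tiles: dict) -> list:
--     possible_neighbours = []
--     for t in tiles:
--         if t != tile:
--             for e in tiles[t]:
--                 if e == edge or e[::-1] == edge:
--                     possible_neighbours.append(t)
--     return possible_neighbours
--
-- def get_all_neighbours(tiles: dict) -> dict:
--     all_neighbours = {}
--     for i in tiles:
--         neighbours = {}
--         for e in tiles[i]:
--             n = get_possible_neighbours(i, e, tiles)
--             neighbours[e] = n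
--         all_neighbours[i] = neighbours
--     return all_neighbours
-- ===== SOURCE B (Python) =====
-- def get_all_neighbours(tiles: dict) -> dict:
--     # One pass builds an index: edge string -> tiles having that edge (forwards or reversed),
--     # then each answer is a single lookup filtered for the tile itself.
--     index = {}
--     for t, edges in tiles.items():
--         for e in edges:
--             index.setdefault(e, []).append(t)
--             r = e[::-1]
--             if r != e:
--                 index.setdefault(r, []).append(t)
--     return {i: {e: [t for t in index[e] if t != i] for e in es}
--             for i, es in tiles.items()}
-- ===== Notes on version B (the rewrite author's own statement) =====
-- stated objective: faster
-- what changed: Replaces the nested rescan of every tile's edges for every (tile, edge) query by a dictionary built in one pass mapping each edge string (and its reversal) to the ordered list of tiles carrying it, so each answer is a single lookup filtered for the tile itself.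
import Mathlib
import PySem

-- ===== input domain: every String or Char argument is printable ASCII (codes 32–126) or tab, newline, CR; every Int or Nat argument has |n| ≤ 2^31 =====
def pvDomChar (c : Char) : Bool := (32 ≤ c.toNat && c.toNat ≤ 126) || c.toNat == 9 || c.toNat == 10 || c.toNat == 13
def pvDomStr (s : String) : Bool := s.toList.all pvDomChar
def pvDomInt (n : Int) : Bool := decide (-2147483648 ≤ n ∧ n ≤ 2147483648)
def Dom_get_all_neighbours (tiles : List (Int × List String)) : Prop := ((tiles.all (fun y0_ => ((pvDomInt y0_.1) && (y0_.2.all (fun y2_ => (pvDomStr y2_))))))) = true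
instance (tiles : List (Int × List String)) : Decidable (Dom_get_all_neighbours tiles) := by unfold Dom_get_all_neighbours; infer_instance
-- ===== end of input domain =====

-- ===== PORT A =====
-- B is the same function computed through a one-pass edge index (see PORT B); header note:
-- A = B proved on association lists with pairwise-distinct tile ids (Pre_), i.e. on every real Python dict.

-- s[::-1]; exact: PySem.Str.slice?_none_none_neg_one (always `some`)
def pyRev (s : String) : String := (PySem.Str.slice? s none none (-1)).getD ""

-- tiles[t] on the association list: first matching key (t always present when used)
def pyLookup (tiles : List (Int × List String)) (t : Int) : List String :=
  match tiles.find? (fun q => q.1 == t) with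
  | some q => q.2
  | none => []

def get_possible_neighbours (tile : Int) (edge : String) (tiles : List (Int × List String)) : List Int :=
  tiles.foldl (fun acc p =>
    if p.1 ≠ tile then
      (pyLookup tiles p.1).foldl (fun acc2 e =>
        if e = edge ∨ pyRev e = edge then acc2 ++ [p.1] else acc2) acc
    else acc) []

def get_all_neighbours (tiles : List (Int × List String)) : List (Int × List (String × List Int)) :=
  (tiles.foldl (fun (all : PySem.Dict Int (PySem.Dict String (List Int))) p =>
      all.insert p.1
        ((pyLookup tiles p.1).foldl (fun (nb : PySem.Dict String (List Int)) e =>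
            nb.insert e (get_possible_neighbours p.1 e tiles)) PySem.Dict.empty))
    PySem.Dict.empty).items.map (fun q => (q.1, q.2.items))

-- ===== PORT B =====
-- index.setdefault(k, []).append(t) is Dict.modify k [] (· ++ [t])
def buildIndex (tiles : List (Int × List String)) : PySem.Dict String (List Int) :=
  tiles.foldl (fun idx p =>
    p.2.foldl (fun idx e =>
      let idx1 := idx.modify e [] (· ++ [p.1])
      let r := pyRev e
      if r ≠ e then idx1.modify r [] (· ++ [p.1]) else idx1) idx) PySem.Dict.empty

def get_all_neighbours_alt (tiles : List (Int × List String)) : List (Int × List (String × List Int)) :=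
  -- outer dict comprehension over tiles.items(): keys are the distinct tile ids in order (Pre_)
  tiles.map (fun p => (p.1,
    (p.2.foldl (fun (nb : PySem.Dict String (List Int)) e =>
        nb.insert e (((buildIndex tiles).getD e []).filter (fun t => t ≠ p.1))) PySem.Dict.empty).items))

-- ===== PRECONDITION & SPEC =====
-- Pre_ excludes association lists with duplicate tile ids, which cannot arise from a Python
-- dict argument: duplicate-key behaviour would be an artefact of the list representation.
def Pre_get_all_neighbours (tiles : List (Int × List String)) : Prop :=
  (tiles.map Prod.fst).Nodup
instance (tiles : List (Int × List String)) : Decidable (Pre_get_all_neighbours tiles) := by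
  unfold Pre_get_all_neighbours; infer_instance

def pvWitness_get_all_neighbours : (List (Int × List String)) :=
  [(1, ["ab", "cd"]), (2, ["ba"]), (3, ["dc", "ab"])]

def Spec_get_all_neighbours (tiles : List (Int × List String)) (out : List (Int × List (String × List Int))) : Prop := out = get_all_neighbours_alt tiles
instance (tiles : List (Int × List String)) (out : List (Int × List (String × List Int))) : Decidable (Spec_get_all_neighbours tiles out) := by unfold Spec_get_all_neighbours; infer_instance

-- ===== CLAIM (what is proved, stated in full; the proofs are below) =====
def Claim_equal_get_all_neighbours : Prop := ∀ (tiles : List (Int × List String)), Dom_get_all_neighbours tiles → Pre_get_all_neighbours tiles → Spec_get_all_neighbours tiles (get_all_neighbours tiles)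

-- ===== LEMMAS AND PROOFS =====

-- the per-edge contribution of tile p to the index entry of edge `e`
def contrib (e : String) (p : Int × List String) : List Int :=
  (p.2.filter (fun e' => decide (e' = e ∨ pyRev e' = e))).map (fun _ => p.1)

theorem find?_self_of_nodup {tiles : List (Int × List String)} {p : Int × List String}
    (hnd : (tiles.map Prod.fst).Nodup) (hp : p ∈ tiles) :
    tiles.find? (fun q => q.1 == p.1) = some p := by
  induction tiles with
  | nil => cases hp
  | cons q rest ih =>
    simp only [List.map_cons, List.nodup_cons] at hnd
    rcases List.mem_cons.mp hp with rfl | hmem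
    · simp [List.find?]
    · have hne : (q.1 == p.1) = false := by
        refine beq_eq_false_iff_ne.mpr ?_
        intro h
        exact hnd.1 (h ▸ List.mem_map.mpr ⟨p, hmem, rfl⟩)
      simp [hne, ih hnd.2 hmem]

theorem pyLookup_eq {tiles : List (Int × List String)} {p : Int × List String}
    (hnd : (tiles.map Prod.fst).Nodup) (hp : p ∈ tiles) :
    pyLookup tiles p.1 = p.2 := by
  simp [pyLookup, find?_self_of_nodup hnd hp]

theorem getD_buildIndex_step (d : PySem.Dict String (List Int)) (t : Int) (e' e : String) :
    ((let d1 := d.modify e' [] (· ++ [t]);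
      if pyRev e' ≠ e' then d1.modify (pyRev e') [] (· ++ [t]) else d1).getD e []) =
    d.getD e [] ++ (if e' = e ∨ pyRev e' = e then [t] else []) := by
  by_cases hpal : pyRev e' = e'
  · simp only [hpal, ne_eq, not_true_eq_false, if_false]
    rw [PySem.Dict.getD_modify]
    by_cases h1 : e = e'
    · simp [h1]
    · have h1' : ¬ e' = e := fun h => h1 h.symm
      simp [h1, h1']
  · simp only [ne_eq, hpal, not_false_eq_true, if_true]
    rw [PySem.Dict.getD_modify, PySem.Dict.getD_modify, PySem.Dict.getD_modify]
    by_cases h2 : e = pyRev e'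
    · rw [if_pos h2, if_neg hpal, if_pos (Or.inr h2.symm), h2]
    · rw [if_neg h2]
      by_cases h1 : e = e'
      · rw [if_pos h1, if_pos (Or.inl h1.symm), h1]
      · rw [if_neg h1, if_neg (fun hc => Or.elim hc (fun hh => h1 hh.symm) (fun hh => h2 hh.symm)),
          List.append_nil]

theorem getD_buildIndex_edges (t : Int) (e : String) (es : List String)
    (d : PySem.Dict String (List Int)) :
    (es.foldl (fun idx e' =>
        let idx1 := idx.modify e' [] (· ++ [t])
        let r := pyRev e'
        if r ≠ e' then idx1.modify r [] (· ++ [t]) else idx1) d).getD e []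
    = d.getD e [] ++ contrib e (t, es) := by
  induction es generalizing d with
  | nil => simp [contrib]
  | cons e' rest ih =>
    rw [List.foldl_cons, ih]
    show _ ++ contrib e (t, rest) = _
    rw [getD_buildIndex_step d t e' e]
    by_cases h : e' = e ∨ pyRev e' = e <;>
      simp [contrib, h, List.append_assoc]

theorem getD_buildIndex (tiles : List (Int × List String)) (e : String) :
    (buildIndex tiles).getD e [] = tiles.flatMap (contrib e) := by
  unfold buildIndex
  suffices h : ∀ d : PySem.Dict String (List Int),
      (tiles.foldl (fun idx p =>
        p.2.foldl (fun idx e' =>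
          let idx1 := idx.modify e' [] (· ++ [p.1])
          let r := pyRev e'
          if r ≠ e' then idx1.modify r [] (· ++ [p.1]) else idx1) idx) d).getD e []
      = d.getD e [] ++ tiles.flatMap (contrib e) by
    simpa using h PySem.Dict.empty
  induction tiles with
  | nil => simp
  | cons p rest ih =>
    intro d
    rw [List.foldl_cons, ih, getD_buildIndex_edges p.1 e p.2 d]
    simp [List.append_assoc]

theorem possible_eq_lookup (tiles : List (Int × List String)) (i : Int) (e : String)
    (hnd : (tiles.map Prod.fst).Nodup) :
    get_possible_neighbours i e tiles =
      ((buildIndex tiles).getD e []).filter (fun t => decide (t ≠ i)) := by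
  unfold get_possible_neighbours
  rw [getD_buildIndex]
  rw [PySem.List.foldl_congr_mem tiles
      (fun acc p =>
        if p.1 ≠ i then
          (pyLookup tiles p.1).foldl (fun acc2 e' =>
            if e' = e ∨ pyRev e' = e then acc2 ++ [p.1] else acc2) acc
        else acc)
      (fun acc p => acc ++ if p.1 ≠ i then contrib e p else []) []
      (by
        intro acc p hp
        dsimp only
        by_cases h : p.1 ≠ i
        · rw [if_pos h, if_pos h, pyLookup_eq hnd hp,
            PySem.List.foldl_append_ite (fun e' => e' = e ∨ pyRev e' = e)
              (fun _ => p.1)]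
          rfl
        · rw [if_neg h, if_neg h, List.append_nil])]
  rw [PySem.List.foldl_append_eq_flatMap]
  rw [List.nil_append, List.filter_flatMap]
  refine List.flatMap_congr ?_
  intro p _
  unfold contrib
  rw [List.filter_map]
  by_cases h : p.1 ≠ i
  · simp [Function.comp_def, h]
  · simp [Function.comp_def, h]

-- ===== VERDICT (by name: the statement is the Claim_ definition above) =====
theorem get_all_neighbours_spec : Claim_equal_get_all_neighbours := by
  intro tiles _ hpre
  unfold Spec_get_all_neighbours get_all_neighbours get_all_neighbours_alt
  have hnd : (tiles.map Prod.fst).Nodup := hpre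
  rw [PySem.Dict.items_foldl_insert_fresh tiles Prod.fst
      (fun p => (pyLookup tiles p.1).foldl (fun (nb : PySem.Dict String (List Int)) e =>
            nb.insert e (get_possible_neighbours p.1 e tiles)) PySem.Dict.empty)
      PySem.Dict.empty
      (by intro a _; exact PySem.Dict.contains_empty a.1) hnd]
  show (([] : List (Int × PySem.Dict String (List Int))) ++ _).map _ = _
  rw [List.nil_append, List.map_map]
  refine List.map_congr_left ?_
  intro p hp
  simp only [Function.comp_apply]
  refine congrArg (fun x => (p.1, PySem.Dict.items x)) ?_
  rw [pyLookup_eq hnd hp]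
  refine PySem.List.foldl_congr_mem p.2 _ _ PySem.Dict.empty ?_
  intro nb e _
  rw [possible_eq_lookup tiles p.1 e hnd]
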